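-- pv_equiv track=rewrite | github.com/mhridoy/Problem_Solving | Python/Problem Solving/CodeForces/Others/A. Tricky Sum.py | TwoThePowersum
-- ===== SOURCE A (Python) =====
-- def TwoThePowersum (n,sum):
--     pow2 = 1;
--     iterate= 0;
--     while (pow2 <= n):
--             sum =sum- 2**iterate;
--             pow2 =2**iterate;
--             iterate+=1;
--     return sum;
-- ===== SOURCE B (Python) =====
-- def TwoThePowersum(n, sum):
--     # Closed form: A subtracts 2^0 .. 2^n.bit_length() (one power past n),
--     # totalling 2^(n.bit_length()+1) - 1; for n < 1 the loop never runs.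
--     if n < 1:
--         return sum
--     return sum - ((1 << (n.bit_length() + 1)) - 1)
-- ===== Notes on version B (the rewrite author's own statement) =====
-- stated objective: faster
-- what changed: Replaces the power-of-two subtraction loop with a single closed-form expression sum - (2^(n.bit_length()+1) - 1), reproducing A's summation of 2^0..2^bit_length(n).
import Mathlib
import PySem

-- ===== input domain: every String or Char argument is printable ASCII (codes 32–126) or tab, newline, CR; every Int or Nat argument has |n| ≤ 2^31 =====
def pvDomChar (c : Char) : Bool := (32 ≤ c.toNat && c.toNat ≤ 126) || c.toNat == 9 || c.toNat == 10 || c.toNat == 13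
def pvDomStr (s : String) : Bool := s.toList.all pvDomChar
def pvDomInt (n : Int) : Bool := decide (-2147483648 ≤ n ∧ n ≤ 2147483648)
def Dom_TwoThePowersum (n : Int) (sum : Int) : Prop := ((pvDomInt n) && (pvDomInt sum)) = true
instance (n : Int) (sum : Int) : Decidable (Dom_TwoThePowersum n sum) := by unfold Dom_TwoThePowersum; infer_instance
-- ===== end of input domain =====

-- B replaces A's while-loop over powers of two by the closed form sum - (2^(bit_length n + 1) - 1); O(1) vs O(log n) loop.

-- ===== PORT A =====
-- A's while loop as fuel recursion on the same state (pow2, iterate, sum); fuel 40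
-- is a termination guard only, never exhausted for n ≤ 2^31 (proved in the claim).
def TwoThePowersumLoop (fuel : Nat) (pow2 : Int) (iterate : Nat) (n : Int) (sum : Int) : Int :=
  match fuel with
  | 0 => sum
  | f + 1 =>
    if pow2 ≤ n then
      TwoThePowersumLoop f ((2:Int)^iterate) (iterate + 1) n (sum - (2:Int)^iterate)
    else sum

def TwoThePowersum (n : Int) (sum : Int) : Int :=
  TwoThePowersumLoop 40 1 0 n sum

-- ===== PORT B =====
-- Python's n.bit_length() for n ≥ 1 equals Nat.log2 n.toNat + 1.
def TwoThePowersum_alt (n : Int) (sum : Int) : Int :=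
  if n < 1 then sum
  else sum - ((2:Int) ^ (Nat.log2 n.toNat + 1 + 1) - 1)

-- ===== PRECONDITION & SPEC =====
def Spec_TwoThePowersum (n : Int) (sum : Int) (out : Int) : Prop := out = TwoThePowersum_alt n sum
instance (n : Int) (sum : Int) (out : Int) : Decidable (Spec_TwoThePowersum n sum out) := by unfold Spec_TwoThePowersum; infer_instance

-- ===== CLAIM (what is proved, stated in full; the proofs are below) =====
def Claim_equal_TwoThePowersum : Prop := ∀ (n : Int) (sum : Int), Dom_TwoThePowersum n sum → Spec_TwoThePowersum n sum (TwoThePowersum n sum)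

-- ===== LEMMAS AND PROOFS =====

theorem loop_stop (fuel : Nat) (pow2 : Int) (iterate : Nat) (n sum : Int)
    (h : ¬ pow2 ≤ n) : TwoThePowersumLoop fuel pow2 iterate n sum = sum := by
  cases fuel with
  | zero => rfl
  | succ f => simp [TwoThePowersumLoop, h]

theorem log2_eq (k : Nat) (m : Nat) (h1 : 2 ^ k ≤ m) (h2 : m < 2 ^ (k + 1)) :
    Nat.log2 m = k := by
  rw [Nat.log2_eq_log_two]
  exact Nat.log_eq_of_pow_le_of_lt_pow h1 h2

-- invariant run: from state (2^(k-1), k, s) with 2^(k-1) ≤ n and enough fuel,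
-- the loop subtracts 2^k + … + 2^(log2 n + 1).
theorem loop_run (f : Nat) : ∀ (k : Nat) (n s : Int), 1 ≤ k →
    (2:Int)^(k-1) ≤ n → n < (2:Int)^(k - 1 + f) →
    TwoThePowersumLoop f ((2:Int)^(k-1)) k n s
      = s - ((2:Int)^(Nat.log2 n.toNat + 2) - (2:Int)^k) := by
  induction f with
  | zero =>
    intro k n s hk hc hf
    simp only [Nat.add_zero] at hf
    exact absurd hc (not_le.mpr hf)
  | succ f ih =>
    intro k n s hk hc hf
    simp only [TwoThePowersumLoop, if_pos hc]
    by_cases h2 : (2:Int)^k ≤ n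
    · have : TwoThePowersumLoop f ((2:Int)^(k+1-1)) (k+1) n (s - (2:Int)^k)
          = (s - (2:Int)^k) - ((2:Int)^(Nat.log2 n.toNat + 2) - (2:Int)^(k+1)) := by
        apply ih (k+1) n (s - (2:Int)^k) (by omega) (by simpa using h2)
        have : k + 1 - 1 + f = k - 1 + (f+1) := by omega
        rw [this]; exact hf
      simp only [Nat.add_sub_cancel] at this
      rw [this, pow_succ]; ring
    · rw [loop_stop _ _ _ _ _ h2]
      -- here 2^(k-1) ≤ n < 2^k, so log2 n.toNat = k - 1
      have hn1 : (1:Int) ≤ n := le_trans (one_le_pow₀ (by norm_num)) hc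
      have hcast : ∀ (j : Nat), ((2^j : Nat) : Int) = (2:Int)^j := by
        intro j; push_cast; ring
      have hlo : 2 ^ (k-1) ≤ n.toNat := by
        rw [Int.le_toNat (by omega : (0:Int) ≤ n), hcast]; exact hc
      have hhi : n.toNat < 2 ^ (k-1+1) := by
        have hk' : k - 1 + 1 = k := by omega
        rw [hk']
        have h3 : n < (2:Int)^k := not_le.mp h2
        have := hcast k
        omega
      have hlog : Nat.log2 n.toNat = k - 1 := log2_eq _ _ hlo hhi
      rw [hlog]
      have hk2 : k - 1 + 2 = k + 1 := by omega
      rw [hk2, pow_succ]; ring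

-- ===== VERDICT (by name: the statement is the Claim_ definition above) =====
theorem TwoThePowersum_spec : Claim_equal_TwoThePowersum := by
  intro n sum hdom
  unfold Spec_TwoThePowersum TwoThePowersum TwoThePowersum_alt
  by_cases hn : n < 1
  · rw [loop_stop _ _ _ _ _ (not_le.mpr (by omega)), if_pos hn]
  · have hn1 : (1:Int) ≤ n := by omega
    have hbound : n ≤ 2147483648 := by
      simp only [Dom_TwoThePowersum, pvDomInt, Bool.and_eq_true, decide_eq_true_eq] at hdom
      exact hdom.1.2
    show TwoThePowersumLoop 40 1 0 n sum = _
    rw [show (TwoThePowersumLoop 40 1 0 n sum)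
        = if (1:Int) ≤ n then TwoThePowersumLoop 39 ((2:Int)^0) 1 n (sum - (2:Int)^0) else sum
      from by norm_num [TwoThePowersumLoop]]
    rw [if_pos hn1, if_neg hn]
    rw [loop_run 39 1 n (sum - (2:Int)^0) le_rfl (by simpa using hn1)
        (by norm_num; omega)]
    norm_num; ring
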